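-- pv_equiv track=rewrite | github.com/connorgre/LLVM_Compiler | Special_Nodes.py | GetStartVec
-- ===== SOURCE A (Python) =====
-- VecRegLen = 1024    # length of the vector register in 4B words
--
-- MaxDivision = 8     # Max divisions of vector
--
-- def GetRegFileDiv(offset):
--     # returns the how much we need to divide reg file into (for offset)
--     if offset == 0:
--         return 1
--
--     minAlign = VecRegLen // MaxDivision
--     count = MaxDivision
--     while ((offset & minAlign == 0) and (count > 0)):
--         count >>= 1
--         minAlign <<= 1
--
--     return count
--
-- def GetStartVec(offset):
--     # Gets the vector to do instruction from
--     if (offset == 0):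
--         return 0
--     start = offset
--     while (start & 1 == 0):
--         start >>= 1
--     # assert that we don't have a higher index than number of divisions
--     assert(start < GetRegFileDiv(offset))
--     return start
-- ===== SOURCE B (Python) =====
-- VecRegLen = 1024    # length of the vector register in 4B words
--
-- MaxDivision = 8     # Max divisions of vector
--
--
-- def GetRegFileDiv(offset):
--     # closed-form table: first aligned bit among minAlign<<i decides the division
--     if offset == 0:
--         return 1
--     minAlign = VecRegLen // MaxDivision
--     for i in range(4):
--         if offset & (minAlign << i):
--             return MaxDivision >> i
--     return 0
--
--
-- def GetStartVec(offset):
--     # Gets the vector to do instruction from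
--     if offset == 0:
--         return 0
--     # odd part in closed form: isolate the lowest set bit and divide it out
--     start = offset // (offset & -offset)
--     # assert that we don't have a higher index than number of divisions
--     assert(start < GetRegFileDiv(offset))
--     return start
-- ===== Notes on version B (the rewrite author's own statement) =====
-- stated objective: idiomatic
-- what changed: The trailing-zero-stripping while loop is replaced by the closed-form odd part offset // (offset & -offset) (isolate the lowest set bit and divide it out), and the helper GetRegFileDiv's shifting loop by a direct four-entry bit-test table; the assert is kept verbatim so AssertionError behaviour is identical.
import Mathlib
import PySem

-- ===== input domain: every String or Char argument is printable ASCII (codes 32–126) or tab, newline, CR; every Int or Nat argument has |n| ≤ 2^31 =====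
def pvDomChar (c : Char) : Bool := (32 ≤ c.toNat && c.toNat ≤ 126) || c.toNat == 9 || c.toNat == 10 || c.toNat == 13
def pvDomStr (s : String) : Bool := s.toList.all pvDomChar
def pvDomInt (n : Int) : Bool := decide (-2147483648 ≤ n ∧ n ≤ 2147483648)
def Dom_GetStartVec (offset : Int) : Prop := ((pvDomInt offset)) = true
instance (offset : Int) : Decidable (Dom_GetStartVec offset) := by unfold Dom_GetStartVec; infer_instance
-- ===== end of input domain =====

-- B replaces A's trailing-zero-stripping while loop by the closed-form odd part
-- offset // (offset & -offset); Pre_ excludes the inputs where A's (and B's) assert raises AssertionError.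


-- ===== PORT A =====
-- while (start & 1 == 0): start >>= 1   — loop state is 'start'; 'start ≠ 0' is only a totality
-- guard (the loop is entered with start = offset ≠ 0, where it holds).  'start & 1' is
-- PySem.Int.band start 1, 'start >>= 1' is 'start >>> (1:Nat)' (arithmetic shift, Python-exact).
def pvStripA (start : Int) : Int :=
  if h : PySem.Int.band start 1 = 0 ∧ start ≠ 0 then pvStripA (start >>> (1 : Nat)) else start
termination_by start.natAbs
decreasing_by
  rw [Int.shiftRight_eq_div_pow]
  have h2 : PySem.Int.mod start 2 = start % 2 := PySem.Int.mod_eq_emod_of_pos (by norm_num)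
  have h1 : start % 2 = 0 := by rw [← h2, ← PySem.Int.band_one]; exact h.1
  have h0 := h.2
  norm_num
  omega

-- the assert 'start < GetRegFileDiv(offset)' raises exactly outside Pre_GetStartVec and never
-- changes the returned value, so the port returns start; GetRegFileDiv appears (closed-form) in Pre_.
def GetStartVec (offset : Int) : Int :=
  if offset = 0 then 0 else pvStripA offset

-- ===== PORT B =====
-- closed-form odd part: offset // (offset & -offset); same assert, captured by Pre_GetStartVec.
def GetStartVec_alt (offset : Int) : Int :=
  if offset = 0 then 0
  else PySem.Int.floordiv offset (PySem.Int.band offset (-offset))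

-- ===== PRECONDITION & SPEC =====
-- GetRegFileDiv(offset), written as its value table (first set bit among 128,256,512,1024)
def pvRegFileDiv (offset : Int) : Int :=
  if offset = 0 then 1
  else if PySem.Int.band offset 128 ≠ 0 then 8
  else if PySem.Int.band offset 256 ≠ 0 then 4
  else if PySem.Int.band offset 512 ≠ 0 then 2
  else if PySem.Int.band offset 1024 ≠ 0 then 1
  else 0

-- Pre_ excludes exactly the inputs on which A's (and B's) assert fails, i.e. Python raises
-- AssertionError; on them neither program returns a value.
def Pre_GetStartVec (offset : Int) : Prop :=
  offset = 0 ∨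
    PySem.Int.floordiv offset (PySem.Int.band offset (-offset)) < pvRegFileDiv offset
instance (offset : Int) : Decidable (Pre_GetStartVec offset) := by
  unfold Pre_GetStartVec; infer_instance

def pvWitness_GetStartVec : Int := (384)

def Spec_GetStartVec (offset : Int) (out : Int) : Prop := out = GetStartVec_alt offset
instance (offset : Int) (out : Int) : Decidable (Spec_GetStartVec offset out) := by
  unfold Spec_GetStartVec; infer_instance

-- ===== CLAIM (what is proved, stated in full; the proofs are below) =====
def Claim_equal_GetStartVec : Prop :=
  ∀ (offset : Int), Dom_GetStartVec offset → Pre_GetStartVec offset →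
    Spec_GetStartVec offset (GetStartVec offset)

-- ===== LEMMAS AND PROOFS =====

-- lowest set bit of a Nat:  m - (m &&& (m-1))
def pvLowbit (m : Nat) : Nat := m - (m &&& (m - 1))

-- A's stripping loop on Nat
def pvStripN (m : Nat) : Nat :=
  if m % 2 = 0 ∧ m ≠ 0 then pvStripN (m / 2) else m
termination_by m
decreasing_by omega

theorem pv_bit_true (n : Nat) : Nat.bit true n = 2 * n + 1 := by
  simp [Nat.bit]

theorem pv_bit_false (n : Nat) : Nat.bit false n = 2 * n := by
  simp [Nat.bit]

theorem pv_band_neg_self (a : Int) :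
    PySem.Int.band a (-a) = (pvLowbit a.natAbs : Int) := by
  rcases lt_trichotomy a 0 with h | h | h
  · have h0 : ¬ (0 ≤ a) := by omega
    have h1 : (0:Int) ≤ -a := by omega
    simp only [PySem.Int.band, h0, h1, if_true, if_false]
    have e1 : (-a - 1).toNat = (-a).toNat - 1 := by omega
    have e2 : a.natAbs = (-a).toNat := by omega
    rw [e1, e2, pvLowbit]
  · subst h; simp [PySem.Int.band, pvLowbit]
  · have h0 : (0:Int) ≤ a := by omega
    have h1 : ¬ ((0:Int) ≤ -a) := by omega
    simp only [PySem.Int.band, h0, h1, if_true, if_false]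
    have e1 : (-(-a) - 1).toNat = a.toNat - 1 := by omega
    have e2 : a.natAbs = a.toNat := by omega
    rw [e1, e2, pvLowbit]

theorem pvLowbit_odd (m : Nat) (h : m % 2 = 1) : pvLowbit m = 1 := by
  obtain ⟨k, rfl⟩ : ∃ k, m = 2 * k + 1 := ⟨m / 2, by omega⟩
  have e1 : 2 * k + 1 = Nat.bit true k := by rw [pv_bit_true]
  have e2 : 2 * k + 1 - 1 = Nat.bit false k := by rw [pv_bit_false]; omega
  have hself : k &&& k = k := by simp
  rw [pvLowbit, e2]
  conv_lhs => rw [e1]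
  rw [Nat.land_bit]
  simp only [Bool.and_false, hself]
  rw [pv_bit_true, pv_bit_false]
  omega

theorem pvLowbit_even (m : Nat) (h : m % 2 = 0) (h0 : m ≠ 0) :
    pvLowbit m = 2 * pvLowbit (m / 2) := by
  obtain ⟨k, rfl⟩ : ∃ k, m = 2 * k := ⟨m / 2, by omega⟩
  have hk : k ≠ 0 := by omega
  have e1 : 2 * k = Nat.bit false k := by rw [pv_bit_false]
  have e2 : 2 * k - 1 = Nat.bit true (k - 1) := by rw [pv_bit_true]; omega
  have e3 : 2 * k / 2 = k := by omega
  have hle : k &&& (k - 1) ≤ k := Nat.and_le_left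
  simp only [pvLowbit, e3]
  rw [e2]
  conv_lhs => rw [e1]
  rw [Nat.land_bit]
  simp only [Bool.false_and]
  rw [pv_bit_false, pv_bit_false]
  omega

theorem pvLowbit_pos (m : Nat) (h : m ≠ 0) : 0 < pvLowbit m := by
  have : m &&& (m - 1) ≤ m - 1 := Nat.and_le_right
  rw [pvLowbit]; omega

theorem pvLowbit_dvd (m : Nat) : pvLowbit m ∣ m := by
  induction m using Nat.strong_induction_on with
  | _ m ih =>
    rcases Nat.eq_zero_or_pos m with h | h
    · simp [h]
    · rcases Nat.even_or_odd m with he | ho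
      · have h2 : m % 2 = 0 := Nat.even_iff.mp he
        rw [pvLowbit_even m h2 (by omega)]
        obtain ⟨c, hc⟩ := ih (m / 2) (by omega)
        exact ⟨c, by rw [mul_assoc, ← hc]; omega⟩
      · rw [pvLowbit_odd m (Nat.odd_iff.mp ho)]; exact one_dvd m

theorem pvStripN_eq (m : Nat) (h : m ≠ 0) : pvStripN m = m / pvLowbit m := by
  induction m using Nat.strong_induction_on with
  | _ m ih =>
    rcases Nat.even_or_odd m with he | ho
    · have h2 : m % 2 = 0 := Nat.even_iff.mp he
      rw [pvStripN]
      rw [if_pos ⟨h2, h⟩]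
      rw [ih (m / 2) (by omega) (by omega), pvLowbit_even m h2 h,
        Nat.div_div_eq_div_mul]
    · have h2 : m % 2 = 1 := Nat.odd_iff.mp ho
      rw [pvStripN, if_neg (by omega), pvLowbit_odd m h2]
      simp

-- parity of an Int read through band _ 1 and through natAbs
theorem pv_band_one_iff (a : Int) : PySem.Int.band a 1 = 0 ↔ a.natAbs % 2 = 0 := by
  rw [PySem.Int.band_one, PySem.Int.mod_eq_emod_of_pos (by norm_num)]
  omega

theorem pvStripA_eq (a : Int) (h : a ≠ 0) :
    pvStripA a = a.sign * (pvStripN a.natAbs : Int) := by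
  suffices H : ∀ n : Nat, ∀ a : Int, a.natAbs = n → a ≠ 0 →
      pvStripA a = a.sign * (pvStripN a.natAbs : Int) from H a.natAbs a rfl h
  intro n
  induction n using Nat.strong_induction_on with
  | _ n ih =>
    intro a hn h
    rw [pvStripA]
    by_cases hp : PySem.Int.band a 1 = 0
    · have hm : a.natAbs % 2 = 0 := (pv_band_one_iff a).mp hp
      rw [dif_pos ⟨hp, h⟩]
      obtain ⟨k, rfl⟩ : ∃ k, a = 2 * k := ⟨a / 2, by omega⟩
      have hk : k ≠ 0 := by omega
      have e1 : (2 * k) >>> (1 : Nat) = k := by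
        rw [Int.shiftRight_eq_div_pow]; norm_num
      rw [e1, ih k.natAbs (by omega) k rfl hk]
      have es : (2 * k).sign = k.sign := by
        rcases lt_trichotomy k 0 with h' | h' | h'
        · rw [Int.sign_eq_neg_one_iff_neg.mpr (by omega),
            Int.sign_eq_neg_one_iff_neg.mpr h']
        · exact absurd h' hk
        · rw [Int.sign_eq_one_iff_pos.mpr (by omega),
            Int.sign_eq_one_iff_pos.mpr h']
      have e2 : (2 * k).natAbs = 2 * k.natAbs := by omega
      have e4 : pvStripN (2 * k.natAbs) = pvStripN k.natAbs := by
        rw [pvStripN, if_pos ⟨by omega, by omega⟩]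
        congr 1
        omega
      rw [es, e2, e4]
    · rw [dif_neg (by simp [hp])]
      have hm : a.natAbs % 2 = 1 := by
        have := (not_iff_not.mpr (pv_band_one_iff a)).mp hp
        omega
      rw [pvStripN, if_neg (by omega)]
      exact (Int.sign_mul_natAbs a).symm

theorem pvAlt_eq (a : Int) (h : a ≠ 0) :
    PySem.Int.floordiv a (PySem.Int.band a (-a)) =
      a.sign * ((a.natAbs / pvLowbit a.natAbs : Nat) : Int) := by
  have hm : a.natAbs ≠ 0 := by omega
  rw [pv_band_neg_self a]
  have hpos : (0 : Int) < (pvLowbit a.natAbs : Int) := by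
    exact_mod_cast pvLowbit_pos a.natAbs hm
  rw [PySem.Int.floordiv_eq_ediv_of_pos hpos]
  have hdvd : ((pvLowbit a.natAbs : Nat) : Int) ∣ ((a.natAbs : Nat) : Int) := by
    exact_mod_cast pvLowbit_dvd a.natAbs
  have ecast : ((a.natAbs : Int)) / ((pvLowbit a.natAbs : Nat) : Int) =
      ((a.natAbs / pvLowbit a.natAbs : Nat) : Int) := by simp
  rcases lt_trichotomy a 0 with h' | h' | h'
  · have e : a = -(a.natAbs : Int) := by omega
    conv_lhs => rw [e]
    simp only [Int.natAbs_neg, Int.natAbs_natCast]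
    rw [Int.neg_ediv_of_dvd hdvd, ecast, Int.sign_eq_neg_one_iff_neg.mpr h']
    ring
  · exact absurd h' h
  · have e : a = (a.natAbs : Int) := by omega
    conv_lhs => rw [e]
    simp only [Int.natAbs_natCast]
    rw [ecast, Int.sign_eq_one_iff_pos.mpr h']
    ring

-- ===== VERDICT (by name: the statement is the Claim_ definition above) =====
theorem GetStartVec_spec : Claim_equal_GetStartVec := by
  intro offset _ _
  unfold Spec_GetStartVec GetStartVec GetStartVec_alt
  by_cases h : offset = 0
  · simp [h]
  · rw [if_neg h, if_neg h, pvStripA_eq offset h, pvAlt_eq offset h,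
      pvStripN_eq offset.natAbs (by omega)]
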